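-- pv_equiv track=rewrite | github.com/EdgarElizondo/Data_Structures_and_Algorithms | 13_DivideAndConquer/NumberFactor.py | numberFactorPermutations
-- ===== SOURCE A (Python) =====
-- def numberFactorPermutations(n):
--     # factors = [1,3,4]
--     if n in (0,1,2):
--         return 1
--     elif n == 3:
--         return 2
--     else:
--         subP1 = numberFactorPermutations(n-1)
--         subP2 = numberFactorPermutations(n-3)
--         subP3 = numberFactorPermutations(n-4)
--         return (subP1 + subP2 + subP3)
-- ===== SOURCE B (Python) =====
-- def numberFactorPermutations(n):
--     # bottom-up DP over the recurrence f(k)=f(k-1)+f(k-3)+f(k-4), O(n) time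
--     if n <= 2:
--         return 1
--     if n == 3:
--         return 2
--     a, b, c, d = 1, 1, 1, 2  # f(k-3), f(k-2), f(k-1), f(k) starting at k=3
--     for _ in range(n - 3):
--         a, b, c, d = b, c, d, d + b + a
--     return d
-- ===== Notes on version B (the rewrite author's own statement) =====
-- stated objective: faster
-- what changed: Replaced the exponential triple recursion with a bottom-up four-variable sliding-window DP over the same recurrence.
import Mathlib
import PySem

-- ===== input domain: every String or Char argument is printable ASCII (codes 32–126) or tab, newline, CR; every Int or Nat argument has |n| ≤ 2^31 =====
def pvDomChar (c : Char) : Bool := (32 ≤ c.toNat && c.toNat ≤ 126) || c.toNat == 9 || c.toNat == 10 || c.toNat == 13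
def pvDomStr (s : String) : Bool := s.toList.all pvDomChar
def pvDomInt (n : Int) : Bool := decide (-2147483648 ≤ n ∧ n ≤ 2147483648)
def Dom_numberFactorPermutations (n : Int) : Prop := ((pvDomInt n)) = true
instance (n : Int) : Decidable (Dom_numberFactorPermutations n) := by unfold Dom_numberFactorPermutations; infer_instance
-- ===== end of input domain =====

-- B replaces A's exponential triple recursion with a bottom-up O(n) sliding-window DP over the same recurrence.


-- ===== PORT A =====
-- A's unbounded Python recursion is ported with a fuel parameter; fuel n.toNat + 1
-- is enough for every n ≥ 0 (proved below), so the port is exact on Pre_.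
def numberFactorPermutationsFuel : Nat → Int → Int
  | 0, _ => 0
  | fuel + 1, n =>
    if n = 0 ∨ n = 1 ∨ n = 2 then 1
    else if n = 3 then 2
    else
      let subP1 := numberFactorPermutationsFuel fuel (n - 1)
      let subP2 := numberFactorPermutationsFuel fuel (n - 3)
      let subP3 := numberFactorPermutationsFuel fuel (n - 4)
      subP1 + subP2 + subP3

def numberFactorPermutations (n : Int) : Int :=
  numberFactorPermutationsFuel (n.toNat + 1) n

-- ===== PORT B =====
def numberFactorPermutations_alt (n : Int) : Int :=
  if n ≤ 2 then 1
  else if n = 3 then 2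
  else
    let s := (List.range (n - 3).toNat).foldl
      (fun (st : Int × Int × Int × Int) _ =>
        (st.2.1, st.2.2.1, st.2.2.2, st.2.2.2 + st.2.1 + st.1))
      (1, 1, 1, 2)
    s.2.2.2

-- ===== PRECONDITION & SPEC =====
-- A recurses forever (Python: RecursionError) on negative n, so Pre_ excludes n < 0.
def Pre_numberFactorPermutations (n : Int) : Prop := 0 ≤ n
instance (n : Int) : Decidable (Pre_numberFactorPermutations n) := by unfold Pre_numberFactorPermutations; infer_instance
def pvWitness_numberFactorPermutations : Int := 5

def Spec_numberFactorPermutations (n : Int) (out : Int) : Prop := out = numberFactorPermutations_alt n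
instance (n : Int) (out : Int) : Decidable (Spec_numberFactorPermutations n out) := by unfold Spec_numberFactorPermutations; infer_instance

-- ===== CLAIM (what is proved, stated in full; the proofs are below) =====
def Claim_equal_numberFactorPermutations : Prop := ∀ (n : Int), Dom_numberFactorPermutations n → Pre_numberFactorPermutations n → Spec_numberFactorPermutations n (numberFactorPermutations n)

-- ===== LEMMAS AND PROOFS =====

-- The mathematical sequence both programs compute.
def nfp : Nat → Int
  | 0 => 1
  | 1 => 1
  | 2 => 1
  | 3 => 2
  | k + 4 => nfp (k + 3) + nfp (k + 1) + nfp k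

lemma fuel_eq_nfp : ∀ (fuel k : Nat), k < fuel →
    numberFactorPermutationsFuel fuel (k : Int) = nfp k := by
  intro fuel
  induction fuel with
  | zero => intro k hk; omega
  | succ f ih =>
    intro k hk
    match k with
    | 0 => simp [numberFactorPermutationsFuel, nfp]
    | 1 => simp [numberFactorPermutationsFuel, nfp]
    | 2 => simp [numberFactorPermutationsFuel, nfp]
    | 3 => simp [numberFactorPermutationsFuel, nfp]
    | k + 4 =>
      have h1 : ((k : Int) + 4) - 1 = ((k + 3 : Nat) : Int) := by push_cast; ring
      have h2 : ((k : Int) + 4) - 3 = ((k + 1 : Nat) : Int) := by push_cast; ring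
      have h3 : ((k : Int) + 4) - 4 = ((k : Nat) : Int) := by ring
      have e1 := ih (k + 3) (by omega)
      have e2 := ih (k + 1) (by omega)
      have e3 := ih k (by omega)
      simp only [numberFactorPermutationsFuel, nfp]
      have hc : ((k + 4 : Nat) : Int) = (k : Int) + 4 := by push_cast; ring
      rw [hc, h1, h2, h3, e1, e2, e3]
      split_ifs with hA hB
      · omega
      · omega
      · rfl

lemma foldl_nfp : ∀ (i : Nat),
    (List.range i).foldl
      (fun (st : Int × Int × Int × Int) _ =>
        (st.2.1, st.2.2.1, st.2.2.2, st.2.2.2 + st.2.1 + st.1))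
      (1, 1, 1, 2)
    = (nfp i, nfp (i + 1), nfp (i + 2), nfp (i + 3)) := by
  intro i
  induction i with
  | zero => simp [nfp]
  | succ j ih =>
    rw [List.range_succ, List.foldl_append, ih]
    simp only [List.foldl_cons, List.foldl_nil]
    have h4 : nfp (j + 4) = nfp (j + 3) + nfp (j + 1) + nfp j := rfl
    rw [h4]

-- ===== VERDICT (by name: the statement is the Claim_ definition above) =====
theorem numberFactorPermutations_spec : Claim_equal_numberFactorPermutations := by
  intro n _ hpre
  unfold Pre_numberFactorPermutations at hpre
  unfold Spec_numberFactorPermutations numberFactorPermutations numberFactorPermutations_alt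
  obtain ⟨k, rfl⟩ : ∃ k : Nat, n = (k : Int) := ⟨n.toNat, by omega⟩
  have hA : numberFactorPermutationsFuel ((k : Int).toNat + 1) (k : Int) = nfp k :=
    fuel_eq_nfp _ k (by simp)
  rw [hA]
  clear hA hpre
  rcases k with _ | _ | _ | _ | k
  · simp [nfp]
  · simp [nfp]
  · norm_num [nfp]
  · norm_num [nfp]
  · show nfp (k + 4) = _
    have hle : ¬ ((k + 4 : Nat) : Int) ≤ 2 := by push_cast; omega
    have hne : ((k + 4 : Nat) : Int) ≠ 3 := by push_cast; omega
    rw [if_neg hle, if_neg hne]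
    have ht : (((k + 4 : Nat) : Int) - 3).toNat = k + 1 := by push_cast; omega
    rw [ht, foldl_nfp (k + 1)]
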